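-- pv_equiv track=rewrite | github.com/yali-show/python_exersises | solutions_day2/strange_string.py | stranger_string
-- ===== SOURCE A (Python) =====
-- def stranger_string(string):
--     splited_string = string.split()
--     str = ""
--     for element in splited_string:
--         for i in range(len(element)):
--
--             if i % 2 == 1:          # is it odd
--                 str = str + element[i].upper()
--             else:
--                 str = str + element[i]
--     return str
-- ===== SOURCE B (Python) =====
-- def stranger_string(string):
--     out = []
--     k = 0
--     for ch in string:
--         if ch.isspace():
--             k = 0
--         else:
--             out.append(ch.upper() if k % 2 == 1 else ch)
--             k += 1
--     return "".join(out)
-- ===== Notes on version B (the rewrite author's own statement) =====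
-- stated objective: simpler
-- what changed: Replaces split() plus an index-based inner loop over each word by a single pass over the original string with a per-word position counter that resets on whitespace, joining the collected characters once.
import Mathlib
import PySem

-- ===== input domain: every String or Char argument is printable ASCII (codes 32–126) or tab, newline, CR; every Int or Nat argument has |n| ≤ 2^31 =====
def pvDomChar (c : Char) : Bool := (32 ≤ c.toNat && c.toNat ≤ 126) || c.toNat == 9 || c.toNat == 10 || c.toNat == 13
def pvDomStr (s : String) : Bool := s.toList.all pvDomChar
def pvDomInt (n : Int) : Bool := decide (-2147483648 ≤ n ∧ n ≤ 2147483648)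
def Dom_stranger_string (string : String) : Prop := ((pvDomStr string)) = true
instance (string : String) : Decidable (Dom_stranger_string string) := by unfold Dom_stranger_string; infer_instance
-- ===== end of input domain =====

-- B replaces split() + an index loop over each word by one pass over the original
-- string with a per-word position counter that resets on whitespace (objective: simpler).

-- ===== PORT A =====
def stranger_string (string : String) : String :=
  let splited_string := PySem.Str.split₀ string
  splited_string.foldl (fun str element =>
    (PySem.List.pyRange 0 (PySem.Str.len element) 1).foldl (fun str i =>
      match PySem.Str.pyGet? element i with
      | some c =>
          if PySem.Int.mod i 2 == 1 then
            str ++ PySem.Str.upper (String.ofList [c])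
          else
            str ++ String.ofList [c]
      | none => str) str) ""

-- ===== PORT B =====
def stranger_string_alt (string : String) : String :=
  String.ofList
    ((string.toList.foldl
        (fun (p : List Char × Nat) ch =>
          if PySem.Chars.isspace ch then (p.1, 0)
          else (p.1 ++ [if p.2 % 2 == 1 then PySem.Chars.upperChar ch else ch], p.2 + 1))
        ([], 0)).1)

-- ===== PRECONDITION & SPEC =====
def Spec_stranger_string (string : String) (out : String) : Prop := out = stranger_string_alt string
instance (string : String) (out : String) : Decidable (Spec_stranger_string string out) := by unfold Spec_stranger_string; infer_instance

-- ===== CLAIM (what is proved, stated in full; the proofs are below) =====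
def Claim_equal_stranger_string : Prop := ∀ (string : String), Dom_stranger_string string → Spec_stranger_string string (stranger_string string)

-- ===== LEMMAS AND PROOFS =====

-- the character at per-word position k, as both programs case it
def pvCase (k : Nat) (c : Char) : Char :=
  if k % 2 == 1 then PySem.Chars.upperChar c else c

-- per-word processing starting at position k (A's inner loop, semantically)
def pvProc : Nat → List Char → List Char
  | _, [] => []
  | k, c :: cs => pvCase k c :: pvProc (k + 1) cs

-- one-pass processing with counter k (B's loop, semantically)
def pvScan : Nat → List Char → List Char
  | _, [] => []
  | k, c :: cs =>
      if PySem.Chars.isspace c then pvScan 0 cs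
      else pvCase k c :: pvScan (k + 1) cs

theorem pvProc_append (xs : List Char) (k : Nat) (ys : List Char) :
    pvProc k (xs ++ ys) = pvProc k xs ++ pvProc (k + xs.length) ys := by
  induction xs generalizing k with
  | nil => simp [pvProc]
  | cons c cs ih =>
      simp [pvProc, ih (k + 1)]
      ring_nf

-- split₀.go and per-word processing fused equal B's one-pass scan
theorem pvGo_flat (cs cur : List Char) (acc : List (List Char)) :
    ((PySem.Chars.split₀.go cs cur acc).flatMap (pvProc 0))
      = (acc.reverse.flatMap (pvProc 0)) ++ pvProc 0 cur.reverse ++ pvScan cur.length cs := by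
  induction cs generalizing cur acc with
  | nil =>
      rw [PySem.Chars.split₀.go]
      by_cases h : cur = []
      · simp [h, pvProc, pvScan]
      · simp [List.isEmpty_iff, h, pvScan]
  | cons c rest ih =>
      rw [PySem.Chars.split₀.go]
      by_cases hs : PySem.Chars.isspace c
      · by_cases h : cur = []
        · simp only [hs, if_true, h, List.isEmpty_nil, ih]
          simp [pvProc, pvScan, hs]
        · simp only [hs, if_true, List.isEmpty_iff, h, if_false, ih]
          simp [pvProc, pvScan, hs]
      · simp only [hs, if_false, Bool.false_eq_true, ih]
        simp [pvScan, hs, pvProc_append, pvProc]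

theorem pvScan_foldl (cs : List Char) (out : List Char) (k : Nat) :
    (cs.foldl
        (fun (p : List Char × Nat) ch =>
          if PySem.Chars.isspace ch then (p.1, 0)
          else (p.1 ++ [if p.2 % 2 == 1 then PySem.Chars.upperChar ch else ch], p.2 + 1))
        (out, k)).1 = out ++ pvScan k cs := by
  induction cs generalizing out k with
  | nil => simp [pvScan]
  | cons c rest ih =>
      rw [List.foldl_cons]
      by_cases hs : PySem.Chars.isspace c
      · rw [if_pos hs, ih, pvScan, if_pos hs]
      · rw [if_neg hs, ih, pvScan, if_neg hs]
        simp [pvCase]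

theorem pvUpper_single (c : Char) :
    PySem.Str.upper (String.ofList [c]) = String.ofList [PySem.Chars.upperChar c] := by
  apply String.toList_inj.mp
  simp [PySem.Str.toList_upper, PySem.Chars.upper]

-- A's inner loop over indices k..len computes pvProc k of the tail
theorem pvInner (w : String) (m : Nat) :
    ∀ (k : Nat), k + m = w.toList.length → ∀ (s : String),
      (PySem.List.pyRange k (PySem.Str.len w) 1).foldl (fun str i =>
          match PySem.Str.pyGet? w i with
          | some c =>
              if PySem.Int.mod i 2 == 1 then
                str ++ PySem.Str.upper (String.ofList [c])
              else
                str ++ String.ofList [c]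
          | none => str) s
        = s ++ String.ofList (pvProc k (w.toList.drop k)) := by
  induction m with
  | zero =>
      intro k hk s
      have hlen : PySem.Str.len w = (k : Int) := by
        have : PySem.Str.len w = (w.toList.length : Int) := by simp [PySem.Str.len_eq]
        rw [this]; omega
      rw [hlen]
      have : PySem.List.pyRange (k : Int) (k : Int) 1 = [] := by
        simp [PySem.List.pyRange]
      rw [this]
      simp [List.drop_eq_nil_of_le (by omega : w.toList.length ≤ k), pvProc]
  | succ m ih =>
      intro k hk s
      have hklt : (k : Int) < PySem.Str.len w := by
        have : PySem.Str.len w = (w.toList.length : Int) := by simp [PySem.Str.len_eq]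
        rw [this]; omega
      rw [PySem.List.pyRange_one_cons hklt]
      have hklen : k < w.toList.length := by omega
      set c := w.toList[k] with hcdef
      have hc : w.toList[k]? = some c := List.getElem?_eq_some_iff.mpr ⟨hklen, rfl⟩
      have hget : PySem.Str.pyGet? w (k : Int) = some c := by
        simp [PySem.Str.pyGet?_eq, PySem.List.pyGet?_natCast, hc]
      have hdrop : w.toList.drop k = c :: w.toList.drop (k + 1) :=
        List.drop_eq_getElem_cons hklen
      have hmod : (PySem.Int.mod (k : Int) 2 == 1) = (k % 2 == 1) := by
        simp [PySem.Int.mod, Int.fmod_eq_emod]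
        omega
      simp only [List.foldl_cons, hget, hmod]
      have hstep : ∀ s' : String,
          (if (k % 2 == 1) = true then s' ++ PySem.Str.upper (String.ofList [c])
           else s' ++ String.ofList [c]) = s' ++ String.ofList [pvCase k c] := by
        intro s'
        by_cases h : (k % 2 == 1) = true <;> simp [h, pvUpper_single, pvCase]
      rw [hstep]
      have := ih (k + 1) (by omega) (s ++ String.ofList [pvCase k c])
      push_cast at this ⊢
      rw [this, hdrop]
      apply String.toList_inj.mp
      simp [pvProc]

theorem pvOuter (words : List String) (s : String) :
    words.foldl (fun str element =>
        (PySem.List.pyRange 0 (PySem.Str.len element) 1).foldl (fun str i =>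
          match PySem.Str.pyGet? element i with
          | some c =>
              if PySem.Int.mod i 2 == 1 then
                str ++ PySem.Str.upper (String.ofList [c])
              else
                str ++ String.ofList [c]
          | none => str) str) s
      = s ++ String.ofList (words.flatMap (fun w => pvProc 0 w.toList)) := by
  induction words generalizing s with
  | nil => simp [String.toList_inj.mp]
  | cons w ws ih =>
      simp only [List.foldl_cons]
      have h0 := pvInner w (w.toList.length) 0 (by omega) s
      simp only [Nat.cast_zero] at h0
      rw [h0, ih]
      apply String.toList_inj.mp
      simp

-- ===== VERDICT (by name: the statement is the Claim_ definition above) =====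
theorem stranger_string_spec : Claim_equal_stranger_string := by
  intro s _
  unfold Spec_stranger_string stranger_string stranger_string_alt
  rw [pvOuter, pvScan_foldl]
  have hflat : (PySem.Str.split₀ s).flatMap (fun w => pvProc 0 w.toList)
      = (PySem.Chars.split₀ s.toList).flatMap (pvProc 0) := by
    rw [← PySem.Str.split₀_map_toList, List.flatMap_map]
  have hgo := pvGo_flat s.toList [] []
  simp only [List.reverse_nil, List.flatMap_nil, List.nil_append, pvProc, List.length_nil] at hgo
  apply String.toList_inj.mp
  simp only [PySem.Chars.split₀] at hflat
  simp [hflat, hgo]
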